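-- pv_equiv track=rewrite | github.com/sodlfmag/Dev-Course-Algorithm | 프로그래머스/1/121683. [PCCP 모의고사 #1] 1번 - 외톨이 알파벳/[PCCP 모의고사 #1] 1번 - 외톨이 알파벳.py | solution
-- ===== SOURCE A (Python) =====
-- def solution(input_string):
--     answer = {} # alphabet : is_loner(True/False)
--     prev = ''
--     for alphabet in input_string:
--         if alphabet in answer and alphabet != prev: answer[alphabet] = True # 이전 알파벳과 다른 이미 나온 알파벳
--         elif alphabet not in answer: answer[alphabet] = False   # 처음 나온 알파벳
--         prev = alphabet
--     return ''.join(sorted([k for k, v in answer.items() if v])) or 'N'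
-- ===== SOURCE B (Python) =====
-- def solution(input_string):
--     # A character is a loner iff its occurrences are not one contiguous block,
--     # i.e. the string does not contain all its copies as a single substring.
--     s = input_string
--     res = ''.join(c for c in sorted(set(s)) if c * s.count(c) not in s)
--     return res or 'N'
-- ===== Notes on version B (the rewrite author's own statement) =====
-- stated objective: alternative
-- what changed: B drops A's stateful seen/prev dict scan entirely: for each distinct character it tests whether all its occurrences form one contiguous block via the substring test c*s.count(c) in s, filtering the sorted character set.
import Mathlib
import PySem

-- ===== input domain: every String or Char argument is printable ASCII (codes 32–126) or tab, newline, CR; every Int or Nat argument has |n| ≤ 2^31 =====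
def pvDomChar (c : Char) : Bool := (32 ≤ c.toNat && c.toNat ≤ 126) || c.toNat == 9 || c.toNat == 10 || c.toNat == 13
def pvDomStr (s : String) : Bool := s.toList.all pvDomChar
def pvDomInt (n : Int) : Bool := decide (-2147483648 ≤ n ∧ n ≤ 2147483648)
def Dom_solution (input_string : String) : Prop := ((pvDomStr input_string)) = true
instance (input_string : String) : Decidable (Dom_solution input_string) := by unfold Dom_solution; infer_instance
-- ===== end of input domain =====

-- B replaces A's stateful seen/prev dict scan by a per-distinct-character substring test
-- (c * s.count(c) in s, i.e. all copies of c form one contiguous block); objective: alternative.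

-- ===== PORT A =====
-- step of A's loop: state = (answer : dict char->bool, prev); '' initial prev is Option.none
def solStepA (st : PySem.Dict Char Bool × Option Char) (a : Char) :
    PySem.Dict Char Bool × Option Char :=
  let answer :=
    if st.1.contains a && decide ((some a : Option Char) ≠ st.2) then st.1.insert a true
    else if !st.1.contains a then st.1.insert a false
    else st.1
  (answer, some a)

def solution (input_string : String) : String :=
  let st := input_string.toList.foldl solStepA (PySem.Dict.empty, none)
  let joined := String.ofList (PySem.List.sorted
      ((st.1.items.filter (fun kv => kv.2)).map Prod.fst) (fun x => x) false)
  if joined = "" then "N" else joined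

-- ===== PORT B =====
-- Source B's comprehension: filter the sorted character set by 'c * s.count(c) not in s'
def solution_alt (input_string : String) : String :=
  let l := input_string.toList
  let res := String.ofList ((PySem.List.sorted (PySem.Set.ofList l) (fun x => x) false).filter
      (fun c => !(PySem.Chars.isIn (PySem.List.pyRepeat [c] ((PySem.Chars.count l [c] : Nat) : Int)) l)))
  if res = "" then "N" else res

-- ===== PRECONDITION & SPEC =====
def Spec_solution (input_string : String) (out : String) : Prop := out = solution_alt input_string
instance (input_string : String) (out : String) : Decidable (Spec_solution input_string out) := by unfold Spec_solution; infer_instance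

-- ===== CLAIM (what is proved, stated in full; the proofs are below) =====
def Claim_equal_solution : Prop := ∀ (input_string : String), Dom_solution input_string → Spec_solution input_string (solution input_string)

-- ===== LEMMAS AND PROOFS =====

-- 'the occurrences of k in p are one contiguous block (or absent)'
def OkRun (p : List Char) (k : Char) : Prop :=
  k ∉ p ∨ ∃ u m v, p = u ++ List.replicate m k ++ v ∧ k ∉ u ∧ k ∉ v ∧ 1 ≤ m

-- the coupling invariant for A's fold over processed prefix p
def InvA (p : List Char) (st : PySem.Dict Char Bool × Option Char) : Prop :=
  st.2 = p.getLast? ∧ st.1.keys = PySem.List.dedup p ∧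
  (∀ k, st.1.getD k false = false ↔ OkRun p k)

lemma invA_init : InvA [] (PySem.Dict.empty, none) := by
  refine ⟨rfl, rfl, fun k => ?_⟩
  simp [PySem.Dict.getD, PySem.Dict.get?, PySem.Dict.empty, OkRun]

lemma concat_inj' {p q : List Char} {a b : Char} (h : p ++ [a] = q ++ [b]) : p = q ∧ a = b := by
  have hb : a = b := by
    have h2 := congrArg List.getLast? h
    rw [List.getLast?_concat, List.getLast?_concat] at h2
    exact Option.some.inj h2
  subst hb
  exact ⟨by simpa using h, rfl⟩

lemma getLast?_append_replicate (u : List Char) (m : Nat) (a : Char) (hm : 1 ≤ m) :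
    (u ++ List.replicate m a).getLast? = some a := by
  obtain ⟨n, rfl⟩ : ∃ n, m = n + 1 := ⟨m - 1, by omega⟩
  rw [List.replicate_succ', ← List.append_assoc, List.getLast?_concat]

-- if p++[a] splits as u ++ aᵐ ++ v with a ∉ v, then v = []
lemma snoc_split_v_nil {p u v : List Char} {a : Char} {m : Nat}
    (h : p ++ [a] = u ++ List.replicate m a ++ v) (hv : a ∉ v) : v = [] := by
  rcases List.eq_nil_or_concat' v with rfl | ⟨v', b, rfl⟩
  · rfl
  · exfalso
    have h1 : (p ++ [a]).getLast? = some a := List.getLast?_concat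
    have h2 : (u ++ List.replicate m a ++ (v' ++ [b])).getLast? = some b := by
      rw [← List.append_assoc, List.getLast?_concat]
    rw [h, h2] at h1
    exact hv (by simp [Option.some.inj h1])

lemma okRun_snoc_ne {p : List Char} {a k : Char} (hak : a ≠ k) :
    OkRun (p ++ [a]) k ↔ OkRun p k := by
  constructor
  · rintro (h | ⟨u, m, v, he, hu, hv, hm⟩)
    · exact Or.inl (fun hk => h (List.mem_append_left _ hk))
    · rcases List.eq_nil_or_concat' v with rfl | ⟨v', b, rfl⟩
      · exfalso
        have h1 : (p ++ [a]).getLast? = some a := List.getLast?_concat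
        rw [he] at h1
        simp only [List.append_nil] at h1
        rw [getLast?_append_replicate u m k hm] at h1
        exact hak (Option.some.inj h1).symm
      · have h2 : p ++ [a] = (u ++ List.replicate m k ++ v') ++ [b] := by
          rw [he, List.append_assoc (u ++ List.replicate m k) v' [b]]
        obtain ⟨rfl, rfl⟩ := concat_inj' h2
        exact Or.inr ⟨u, m, v', rfl, hu, fun hx => hv (List.mem_append_left _ hx), hm⟩
  · rintro (h | ⟨u, m, v, rfl, hu, hv, hm⟩)
    · exact Or.inl (by simp [h, hak.symm])
    · exact Or.inr ⟨u, m, v ++ [a], by simp [List.append_assoc], hu,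
        by simp [hv, hak.symm], hm⟩

lemma okRun_snoc_fresh {p : List Char} {a : Char} (ha : a ∉ p) : OkRun (p ++ [a]) a :=
  Or.inr ⟨p, 1, [], by simp, ha, by simp, le_refl 1⟩

lemma snoc_split_case {p u : List Char} {a : Char} {m : Nat}
    (he : p ++ [a] = u ++ List.replicate m a) (hm : 1 ≤ m) :
    p = u ++ List.replicate (m - 1) a := by
  obtain ⟨n, rfl⟩ : ∃ n, m = n + 1 := ⟨m - 1, by omega⟩
  have h2 : p ++ [a] = (u ++ List.replicate n a) ++ [a] := by
    rw [he, List.replicate_succ', List.append_assoc]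
  obtain ⟨rfl, -⟩ := concat_inj' h2
  simp

lemma okRun_snoc_last {p : List Char} {a : Char} (ha : a ∈ p) (hl : p.getLast? = some a) :
    OkRun (p ++ [a]) a ↔ OkRun p a := by
  constructor
  · rintro (h | ⟨u, m, v, he, hu, hv, hm⟩)
    · exact absurd (List.mem_append_left _ ha) h
    · have hv0 : v = [] := snoc_split_v_nil he hv
      subst hv0
      rw [List.append_nil] at he
      have hp := snoc_split_case he hm
      have hm1 : 1 ≤ m - 1 := by
        by_contra hn
        have : m - 1 = 0 := by omega
        rw [this] at hp
        simp at hp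
        exact hu (hp ▸ ha)
      exact Or.inr ⟨u, m - 1, [], by simpa using hp, hu, by simp, hm1⟩
  · rintro (h | ⟨u, m, v, rfl, hu, hv, hm⟩)
    · exact absurd ha h
    · have hv0 : v = [] := by
        rcases List.eq_nil_or_concat' v with rfl | ⟨v', b, rfl⟩
        · rfl
        · exfalso
          have h1 : (u ++ List.replicate m a ++ (v' ++ [b])).getLast? = some b := by
            rw [← List.append_assoc, List.getLast?_concat]
          rw [h1] at hl
          exact hv (by simp [Option.some.inj hl])
      subst hv0
      refine Or.inr ⟨u, m + 1, [], ?_, hu, by simp, by omega⟩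
      rw [List.replicate_succ']
      simp [List.append_assoc]

lemma okRun_snoc_gap {p : List Char} {a : Char} (ha : a ∈ p) (hl : p.getLast? ≠ some a) :
    ¬ OkRun (p ++ [a]) a := by
  rintro (h | ⟨u, m, v, he, hu, hv, hm⟩)
  · exact h (List.mem_append_left _ ha)
  · have hv0 : v = [] := snoc_split_v_nil he hv
    subst hv0
    rw [List.append_nil] at he
    have hp := snoc_split_case he hm
    have hm1 : 1 ≤ m - 1 := by
      by_contra hn
      have : m - 1 = 0 := by omega
      rw [this] at hp
      simp at hp
      exact hu (hp ▸ ha)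
    exact hl (hp ▸ getLast?_append_replicate u (m - 1) a hm1)

lemma dedup_snoc (p : List Char) (a : Char) :
    PySem.List.dedup (p ++ [a]) = if a ∈ p then PySem.List.dedup p else PySem.List.dedup p ++ [a] := by
  simp only [PySem.List.dedup_eq_ofList, PySem.Set.ofList_eq_foldl, List.foldl_append,
    List.foldl_cons, List.foldl_nil]
  rw [show List.foldl PySem.Set.add [] p = PySem.Set.ofList p from (PySem.Set.ofList_eq_foldl p).symm]
  by_cases h : a ∈ p
  · rw [if_pos h, PySem.Set.add, if_pos]
    simpa [PySem.Set.contains, List.contains_eq_mem, PySem.Set.mem_ofList] using h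
  · rw [if_neg h, PySem.Set.add, if_neg]
    simpa [PySem.Set.contains, List.contains_eq_mem, PySem.Set.mem_ofList] using h

lemma invA_step (p : List Char) (st : PySem.Dict Char Bool × Option Char)
    (h : InvA p st) (a : Char) : InvA (p ++ [a]) (solStepA st a) := by
  obtain ⟨hprev, hkeys, hok⟩ := h
  have hcontains : st.1.contains a = decide (a ∈ p) := by
    rw [PySem.Dict.contains_eq_decide_mem_keys, hkeys]
    simp
  by_cases hmem : a ∈ p
  · by_cases hlast : p.getLast? = some a
    · -- same run continues: dict unchanged
      have e : solStepA st a = (st.1, some a) := by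
        simp [solStepA, hcontains, hmem, hprev, hlast]
      rw [e]
      refine ⟨by rw [List.getLast?_concat], ?_, fun k => ?_⟩
      · rw [dedup_snoc, if_pos hmem]; exact hkeys
      · by_cases hk : k = a
        · subst hk
          rw [okRun_snoc_last hmem hlast]
          exact hok k
        · rw [okRun_snoc_ne (fun hx => hk hx.symm)]
          exact hok k
    · -- a reappears after a gap: flag set to true
      have e : solStepA st a = (st.1.insert a true, some a) := by
        simp only [solStepA, hcontains, hmem, hprev]
        rw [if_pos]
        simp only [Bool.and_eq_true, decide_eq_true_eq]
        exact ⟨trivial, fun hx => hlast hx.symm⟩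
      rw [e]
      refine ⟨by rw [List.getLast?_concat], ?_, fun k => ?_⟩
      · rw [PySem.Dict.keys_insert_of_contains _ _ (by simp [hcontains, hmem]),
          dedup_snoc, if_pos hmem]
        exact hkeys
      · rw [PySem.Dict.getD_insert]
        by_cases hk : k = a
        · subst hk
          rw [if_pos rfl]
          simp [okRun_snoc_gap hmem hlast]
        · rw [if_neg hk, okRun_snoc_ne (fun hx => hk hx.symm)]
          exact hok k
  · -- first occurrence: flag inserted as false
    have e : solStepA st a = (st.1.insert a false, some a) := by
      simp [solStepA, hcontains, hmem]
    rw [e]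
    refine ⟨by rw [List.getLast?_concat], ?_, fun k => ?_⟩
    · rw [PySem.Dict.keys_insert_of_not_contains _ _ (by simp [hcontains, hmem]),
        dedup_snoc, if_neg hmem, hkeys]
    · rw [PySem.Dict.getD_insert]
      by_cases hk : k = a
      · subst hk
        rw [if_pos rfl]
        simp [okRun_snoc_fresh hmem]
      · rw [if_neg hk, okRun_snoc_ne (fun hx => hk hx.symm)]
        exact hok k

lemma invA_foldl (l : List Char) : ∀ (p : List Char) (st : PySem.Dict Char Bool × Option Char),
    InvA p st → InvA (p ++ l) (l.foldl solStepA st) := by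
  induction l with
  | nil => intro p st h; simpa using h
  | cons a t ih =>
      intro p st h
      have := ih (p ++ [a]) (solStepA st a) (invA_step p st h a)
      simpa [List.append_assoc] using this

-- OkRun ↔ B's substring test, for characters of l
lemma okRun_iff_infix {l : List Char} {k : Char} (hk : k ∈ l) :
    OkRun l k ↔ List.replicate (l.count k) k <:+: l := by
  constructor
  · rintro (h | ⟨u, m, v, rfl, hu, hv, hm⟩)
    · exact absurd hk h
    · have hc : (u ++ List.replicate m k ++ v).count k = m := by
        simp [List.count_append, List.count_eq_zero.mpr hu, List.count_eq_zero.mpr hv]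
      rw [hc]
      exact ⟨u, v, by simp [List.append_assoc]⟩
  · rintro ⟨u, v, he⟩
    have hm : 1 ≤ l.count k := List.count_pos_iff.mpr hk
    have hc : l.count k = u.count k + l.count k + v.count k := by
      conv_lhs => rw [← he]
      simp [List.count_append]
      omega
    refine Or.inr ⟨u, l.count k, v, he.symm, ?_, ?_, hm⟩
    · exact List.count_eq_zero.mp (by omega)
    · exact List.count_eq_zero.mp (by omega)

-- single-character substring count is character count
lemma countGo_singleton (c : Char) (fuel : Nat) : ∀ (l : List Char) (acc : Nat), l.length ≤ fuel →
    PySem.Chars.count.go [c] fuel l acc = acc + l.count c := by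
  induction fuel with
  | zero =>
      intro l acc h
      obtain rfl : l = [] := List.eq_nil_of_length_eq_zero (by omega)
      simp [PySem.Chars.count.go]
  | succ n ih =>
      intro l acc h
      cases l with
      | nil => simp [PySem.Chars.count.go]
      | cons x t =>
          by_cases hx : x = c
          · subst hx
            have hpre : [x].isPrefixOf (x :: t) = true := by simp [List.isPrefixOf]
            simp only [PySem.Chars.count.go, hpre, if_pos, List.length_cons,
              List.length_nil, Nat.zero_add, List.drop_one, List.tail_cons]
            rw [ih t (acc + 1) (by simpa using Nat.le_of_succ_le_succ h)]
            simp
            omega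
          · have hpre : [c].isPrefixOf (x :: t) = false := by
              simp only [List.isPrefixOf, Bool.and_eq_false_iff]
              left
              simp [beq_eq_false_iff_ne]
              intro hc; exact absurd hc.symm hx
            simp only [PySem.Chars.count.go, hpre, Bool.false_eq_true, if_false]
            rw [ih t acc (by simpa using Nat.le_of_succ_le_succ h)]
            simp [hx]

lemma chars_count_singleton (l : List Char) (c : Char) :
    PySem.Chars.count l [c] = l.count c := by
  rw [PySem.Chars.count]
  rw [if_neg (by simp)]
  exact (countGo_singleton c l.length l 0 (le_refl _)).trans (by omega)

-- B's filter predicate holds exactly on non-OkRun characters of l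
lemma predB_iff (l : List Char) (k : Char) (hk : k ∈ l) :
    (!(PySem.Chars.isIn (PySem.List.pyRepeat [k] ((PySem.Chars.count l [k] : Nat) : Int)) l)) = true
      ↔ ¬ OkRun l k := by
  rw [PySem.List.pyRepeat_singleton, chars_count_singleton]
  simp only [Int.toNat_natCast, Bool.not_eq_true', PySem.Chars.isIn_eq_false_iff]
  constructor
  · exact fun hn hOk => hn ((okRun_iff_infix hk).mp hOk)
  · exact fun hn hx => hn ((okRun_iff_infix hk).mpr hx)

-- the two filtered key lists coincide
lemma result_lists_eq (l : List Char) :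
    PySem.List.sorted
      ((((l.foldl solStepA (PySem.Dict.empty, none)).1.items.filter (fun kv => kv.2)).map Prod.fst))
      (fun x => x) false
    = (PySem.List.sorted (PySem.Set.ofList l) (fun x => x) false).filter
        (fun c => !(PySem.Chars.isIn (PySem.List.pyRepeat [c] ((PySem.Chars.count l [c] : Nat) : Int)) l)) := by
  obtain ⟨-, hkeys, hok⟩ := invA_foldl l [] (PySem.Dict.empty, none) invA_init
  simp only [List.nil_append] at hkeys hok
  set d := (l.foldl solStepA (PySem.Dict.empty, none)).1 with hd
  have hnd : d.keys.Nodup := by rw [hkeys]; exact PySem.List.nodup_dedup l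
  have hitems := PySem.Dict.items_eq_map_keys d hnd false
  have hflt : ((d.items.filter (fun kv => kv.2)).map Prod.fst)
      = d.keys.filter (fun k => d.getD k false) := by
    rw [hitems, List.filter_map, List.map_map]
    simp [Function.comp_def]
  rw [hflt, hkeys, PySem.List.dedup_eq_ofList]
  -- predicates agree on members of the set
  have hpred : ∀ k ∈ (PySem.Set.ofList l : List Char),
      d.getD k false
        = (!(PySem.Chars.isIn (PySem.List.pyRepeat [k] ((PySem.Chars.count l [k] : Nat) : Int)) l)) := by
    intro k hkmem
    have hkl : k ∈ l := (PySem.Set.mem_ofList l k).mp hkmem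
    rw [Bool.eq_iff_iff, predB_iff l k hkl]
    constructor
    · intro ht hOk
      have := (hok k).mpr hOk
      rw [ht] at this
      exact Bool.true_eq_false.mp this
    · intro hn
      cases hb : d.getD k false with
      | false => exact absurd ((hok k).mp hb) hn
      | true => rfl
  rw [List.filter_congr hpred]
  apply PySem.List.sorted_id_eq_of_perm_of_pairwise
  · exact List.Perm.filter _ (PySem.List.sorted_perm (PySem.Set.ofList l) (fun x => x) false)
  · exact List.Pairwise.filter _ (PySem.List.sorted_pairwise (PySem.Set.ofList l) (fun x => x))

theorem solution_eq_alt (s : String) : solution s = solution_alt s := by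
  simp only [solution, solution_alt, result_lists_eq]

-- ===== VERDICT (by name: the statement is the Claim_ definition above) =====
theorem solution_spec : Claim_equal_solution := by
  intro s _
  unfold Spec_solution
  exact solution_eq_alt s
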